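-- pv_equiv track=rewrite | github.com/HerrNamenlos123/G3SDK | xmot/bvh.py | findTwoKeyframesToInterpolate
-- ===== SOURCE A (Python) =====
-- def findTwoKeyframesToInterpolate(frames, time):
--     lower = None
--     upper = frames[0]       # The first keyframe is the upper one
--
--     index = 1
--     while time > upper[0] and index < len(frames):  # Find the first keyframe that is larger than the time
--         lower = upper
--         upper = frames[index]
--         index += 1
--
--     if lower is None:       # If we are at the beginning of the animation, we just take the first keyframe
--         lower = upper
--
--     if time > upper[0]:     # If we are at the end of the animation, we just take the last keyframe
--         lower = upper
--
--     return lower, upper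
-- ===== SOURCE B (Python) =====
-- def findTwoKeyframesToInterpolate(frames, time):
--     hits = [time <= f[0] for f in frames]
--     if True not in hits:
--         last = frames[-1]        # time is past every keyframe: clamp to the last one
--         return last, last
--     k = hits.index(True)         # first keyframe at or past `time`
--     lower = frames[k - 1] if k > 0 else frames[k]
--     return lower, frames[k]
-- ===== Notes on version B (the rewrite author's own statement) =====
-- stated objective: alternative
-- what changed: Replaced A's stateful while-loop (lower/upper/index with two post-hoc fix-ups) by staged passes: a boolean map over keyframe times, a first-hit lookup with list.index, and O(1) assembly by direct indexing.
-- outside the precondition, e.g. on findTwoKeyframesToInterpolate([(5,), ()], 3): A returns ((5,), (5,)), B raises IndexError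
import Mathlib
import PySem

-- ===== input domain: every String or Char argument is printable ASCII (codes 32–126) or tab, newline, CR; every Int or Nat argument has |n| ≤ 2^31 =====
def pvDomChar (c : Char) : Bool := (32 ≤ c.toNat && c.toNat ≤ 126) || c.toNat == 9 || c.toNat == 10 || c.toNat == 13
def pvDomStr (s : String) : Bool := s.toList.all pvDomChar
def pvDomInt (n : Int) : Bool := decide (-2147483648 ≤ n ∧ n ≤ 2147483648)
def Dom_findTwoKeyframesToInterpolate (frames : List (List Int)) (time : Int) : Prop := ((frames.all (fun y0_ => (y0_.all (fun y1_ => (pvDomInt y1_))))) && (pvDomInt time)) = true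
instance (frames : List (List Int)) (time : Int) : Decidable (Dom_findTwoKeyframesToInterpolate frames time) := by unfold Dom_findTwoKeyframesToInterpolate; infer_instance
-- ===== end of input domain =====

-- B replaces A's stateful while-loop (lower/upper/index + two post-hoc fix-ups) by staged
-- passes: a boolean map over keyframe times, a first-hit lookup with list.index, and O(1)
-- assembly by direct indexing; same O(n) cost.


-- ===== PORT A =====
-- the while loop; `none` results of pyGet? are IndexError, excluded by Pre_ (we return the
-- current state there; such inputs are outside the claim)
def loopA (frames : List (List Int)) (time : Int) (lower : Option (List Int))
    (upper : List Int) (index : Nat) (fuel : Nat) : Option (List Int) × List Int :=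
  match fuel with
  | 0 => (lower, upper)
  | fuel' + 1 =>
    match PySem.List.pyGet? upper 0 with
    | none => (lower, upper)          -- IndexError in the loop condition (outside Pre_)
    | some u0 =>
      if time > u0 ∧ index < frames.length then
        match PySem.List.pyGet? frames (index : Int) with
        | none => (lower, upper)      -- unreachable: index < len(frames)
        | some f => loopA frames time (some upper) f (index + 1) fuel'
      else (lower, upper)
  termination_by structural fuel

def findTwoKeyframesToInterpolate (frames : List (List Int)) (time : Int) : List (List Int) :=
  match PySem.List.pyGet? frames 0 with
  | none => []                        -- IndexError: frames is empty (outside Pre_)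
  | some upper0 =>
    let r := loopA frames time none upper0 1 frames.length
    let lower := match r.1 with
      | none => r.2                   -- if lower is None: lower = upper
      | some l => l
    let lower := match PySem.List.pyGet? r.2 0 with
      | none => lower                 -- IndexError (outside Pre_)
      | some u0 => if time > u0 then r.2 else lower
    [lower, r.2]

-- ===== PORT B =====
-- the comprehension [time <= f[0] for f in frames]; none = IndexError on an empty record
def headsOf : List (List Int) → Option (List Int)
  | [] => some []
  | f :: r =>
    match PySem.List.pyGet? f 0 with
    | none => none                    -- IndexError: empty keyframe record (outside Pre_)
    | some h => (headsOf r).map (h :: ·)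

def findTwoKeyframesToInterpolate_alt (frames : List (List Int)) (time : Int) : List (List Int) :=
  match headsOf frames with
  | none => []                        -- IndexError in the comprehension (outside Pre_)
  | some ts =>
    let hits := ts.map (fun t => decide (time ≤ t))
    if hits.contains true then
      match PySem.List.index? hits true with
      | none => []                    -- unreachable: hits contains True
      | some k =>
        match PySem.List.pyGet? frames (k : Int) with
        | none => []                  -- unreachable: k < len(frames)
        | some up =>
          if 0 < k then
            match PySem.List.pyGet? frames ((k : Int) - 1) with
            | none => []              -- unreachable: 0 ≤ k-1 < len(frames)
            | some lo => [lo, up]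
          else [up, up]
    else
      match PySem.List.pyGet? frames (-1) with
      | none => []                    -- IndexError: frames is empty (outside Pre_)
      | some last => [last, last]

-- ===== PRECONDITION & SPEC =====
-- Pre_ excludes the empty frames list (A raises IndexError) and any input containing an
-- empty keyframe record: A raises IndexError on the records its scan visits, and B's
-- comprehension evaluates f[0] of EVERY record and raises even where A would return.
def Pre_findTwoKeyframesToInterpolate (frames : List (List Int)) (time : Int) : Prop :=
  frames ≠ [] ∧ ∀ f ∈ frames, f ≠ []
instance (frames : List (List Int)) (time : Int) : Decidable (Pre_findTwoKeyframesToInterpolate frames time) := by unfold Pre_findTwoKeyframesToInterpolate; infer_instance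
def pvWitness_findTwoKeyframesToInterpolate : List (List Int) × Int := ([[0, 1], [10, 2], [20, 3]], 15)
def Spec_findTwoKeyframesToInterpolate (frames : List (List Int)) (time : Int) (out : List (List Int)) : Prop := out = findTwoKeyframesToInterpolate_alt frames time
instance (frames : List (List Int)) (time : Int) (out : List (List Int)) : Decidable (Spec_findTwoKeyframesToInterpolate frames time out) := by unfold Spec_findTwoKeyframesToInterpolate; infer_instance

-- ===== CLAIM (what is proved, stated in full; the proofs are below) =====
def Claim_equal_findTwoKeyframesToInterpolate : Prop := ∀ (frames : List (List Int)) (time : Int), Dom_findTwoKeyframesToInterpolate frames time → Pre_findTwoKeyframesToInterpolate frames time → Spec_findTwoKeyframesToInterpolate frames time (findTwoKeyframesToInterpolate frames time)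

-- ===== LEMMAS AND PROOFS =====

-- reference recursion: the bracketing scan with the previous frame carried along
def goB (time : Int) (prev : List Int) : List (List Int) → List (List Int)
  | [] => [prev, prev]
  | cur :: rest =>
    if time ≤ cur.headD 0 then [prev, cur] else goB time cur rest

-- A's final fix-ups applied to the loop's exit state
def postA (time : Int) (r : Option (List Int) × List Int) : List (List Int) :=
  let lower := match r.1 with
    | none => r.2
    | some l => l
  let lower := match PySem.List.pyGet? r.2 0 with
    | none => lower
    | some u0 => if time > u0 then r.2 else lower
  [lower, r.2]

-- index-free version of A's loop: `rest` plays the role of frames.drop index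
def loopL (time : Int) (lower : Option (List Int)) (upper : List Int)
    (rest : List (List Int)) (fuel : Nat) : Option (List Int) × List Int :=
  match fuel with
  | 0 => (lower, upper)
  | fuel' + 1 =>
    match PySem.List.pyGet? upper 0 with
    | none => (lower, upper)
    | some u0 =>
      if time > u0 then
        match rest with
        | [] => (lower, upper)
        | f :: rest' => loopL time (some upper) f rest' fuel'
      else (lower, upper)
  termination_by structural fuel

theorem loopA_eq_loopL (frames : List (List Int)) (time : Int) :
    ∀ (fuel : Nat) (lower : Option (List Int)) (upper : List Int) (index : Nat),
    loopA frames time lower upper index fuel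
      = loopL time lower upper (frames.drop index) fuel := by
  intro fuel
  induction fuel with
  | zero => intro lower upper index; simp only [loopA, loopL]
  | succ fuel ih =>
    intro lower upper index
    simp only [loopA, loopL]
    cases hget : PySem.List.pyGet? upper 0 with
    | none => rfl
    | some u0 =>
      by_cases ht : time > u0
      · by_cases hidx : index < frames.length
        · simp only [List.drop_eq_getElem_cons hidx, PySem.List.pyGet?_natCast,
            List.getElem?_eq_getElem hidx, ht, hidx, and_self, if_true]
          exact ih (some upper) frames[index] (index + 1)
        · simp only [List.drop_eq_nil_of_le (show frames.length ≤ index by omega),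
            if_pos ht, if_neg (show ¬ (time > u0 ∧ index < frames.length) from fun h => hidx h.2)]
      · simp only [if_neg ht, if_neg (show ¬ (time > u0 ∧ index < frames.length) from fun h => ht h.1)]

theorem main_lemma (time : Int) :
    ∀ (rest : List (List Int)) (prev : List Int) (lower : Option (List Int)) (fuel : Nat),
    rest.length ≤ fuel → prev ≠ [] →
    (∀ f ∈ rest, f ≠ []) →
    time > prev.headD 0 →
    postA time (loopL time lower prev rest (fuel + 1)) = goB time prev rest := by
  intro rest
  induction rest with
  | nil =>
    intro prev lower fuel _ hprev _ ht
    cases prev with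
    | nil => exact absurd rfl hprev
    | cons p0 ps =>
      simp only [List.headD] at ht
      simp only [loopL, goB, postA, PySem.List.pyGet?_zero_cons, if_pos ht]
  | cons cur rest' ih =>
    intro prev lower fuel hlen hprev hrest ht
    obtain ⟨k, rfl⟩ : ∃ k, fuel = k + 1 := ⟨fuel - 1, by simp at hlen; omega⟩
    cases prev with
    | nil => exact absurd rfl hprev
    | cons p0 ps =>
      simp only [List.headD] at ht
      have hcur : cur ≠ [] := hrest cur (by simp)
      cases cur with
      | nil => exact absurd rfl hcur
      | cons c0 cs =>
        have hstep : loopL time lower (p0 :: ps) ((c0 :: cs) :: rest') (k + 1 + 1)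
            = loopL time (some (p0 :: ps)) (c0 :: cs) rest' (k + 1) := by
          simp only [loopL, PySem.List.pyGet?_zero_cons, if_pos ht]
        rw [hstep]
        by_cases htc : time ≤ c0
        · have hexit : loopL time (some (p0 :: ps)) (c0 :: cs) rest' (k + 1)
              = (some (p0 :: ps), c0 :: cs) := by
            simp only [loopL, PySem.List.pyGet?_zero_cons,
              if_neg (show ¬ time > c0 by omega)]
          rw [hexit]
          simp only [postA, goB, List.headD, PySem.List.pyGet?_zero_cons, if_pos htc,
            if_neg (show ¬ time > c0 by omega)]
        · have hrec := ih (c0 :: cs) (some (p0 :: ps)) k (by simp at hlen ⊢; omega)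
            (by simp)
            (fun f hf => hrest f (by simp [hf]))
            (by simp only [List.headD]; omega)
          rw [hrec]
          simp only [goB, List.headD, if_neg htc]

-- the comprehension on all-nonempty records: the heads, as a total map
theorem headsOf_eq (l : List (List Int)) (h : ∀ f ∈ l, f ≠ []) :
    headsOf l = some (l.map (fun f => f.headD 0)) := by
  induction l with
  | nil => rfl
  | cons f r ih =>
    have hf : f ≠ [] := h f (by simp)
    cases f with
    | nil => exact absurd rfl hf
    | cons h0 hs =>
      simp only [headsOf, PySem.List.pyGet?_zero_cons, List.map_cons, List.headD,
        ih (fun g hg => h g (by simp [hg])), Option.map_some]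

-- B equals the bracketing recursion on all-nonempty inputs
theorem alt_eq_goB (time : Int) :
    ∀ (rest : List (List Int)) (prev : List Int), prev ≠ [] → (∀ f ∈ rest, f ≠ []) →
    findTwoKeyframesToInterpolate_alt (prev :: rest) time
      = if time ≤ prev.headD 0 then [prev, prev] else goB time prev rest := by
  intro rest
  induction rest with
  | nil =>
    intro prev hprev _
    cases prev with
    | nil => exact absurd rfl hprev
    | cons p0 ps =>
      have hh : headsOf [p0 :: ps] = some [p0] := by
        simp [headsOf, PySem.List.pyGet?_zero_cons]
      rw [List.headD_cons]
      by_cases h1 : time ≤ p0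
      · rw [if_pos h1]
        simp only [findTwoKeyframesToInterpolate_alt, hh, List.map_cons, List.map_nil,
          decide_eq_true h1, List.contains_cons]
        rw [PySem.List.index?_cons_self]
        simp [PySem.List.pyGet?_natCast]
      · rw [if_neg h1]
        simp only [findTwoKeyframesToInterpolate_alt, hh, List.map_cons, List.map_nil,
          decide_eq_false h1, List.contains_cons, List.contains_nil, goB]
        rw [PySem.List.pyGet?_neg_one]
        simp
  | cons c r ih =>
    intro prev hprev hrest
    cases prev with
    | nil => exact absurd rfl hprev
    | cons p0 ps =>
      have hc : c ≠ [] := hrest c (by simp)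
      cases c with
      | nil => exact absurd rfl hc
      | cons c0 cs =>
        have hr : ∀ f ∈ r, f ≠ [] := fun f hf => hrest f (by simp [hf])
        have hheads : headsOf ((p0 :: ps) :: (c0 :: cs) :: r)
            = some (p0 :: c0 :: r.map (fun f => f.headD 0)) := by
          rw [headsOf_eq]
          · simp
          · intro f hf
            simp only [List.mem_cons] at hf
            rcases hf with rfl | rfl | hf
            · simp
            · simp
            · exact hr f hf
        rw [List.headD_cons]
        by_cases h1 : time ≤ p0
        · -- first hit at index 0
          rw [if_pos h1]
          simp only [findTwoKeyframesToInterpolate_alt, hheads, List.map_cons,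
            decide_eq_true h1, List.contains_cons]
          rw [PySem.List.index?_cons_self]
          simp [PySem.List.pyGet?_natCast]
        · rw [if_neg h1]
          by_cases h2 : time ≤ c0
          · -- first hit at index 1
            simp only [findTwoKeyframesToInterpolate_alt, hheads, List.map_cons,
              decide_eq_false h1, decide_eq_true h2, goB, List.headD_cons]
            have hcond : ((false : Bool) :: true
                :: (r.map (fun f => f.headD 0)).map (fun t => decide (time ≤ t))).contains true
                = true := by simp
            rw [if_pos h2, if_pos hcond,
              PySem.List.index?_cons_of_ne _ (show (false : Bool) ≠ true by decide),
              PySem.List.index?_cons_self]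
            simp only [Option.map_some, Nat.zero_add]
            have e0 : ((1 : Nat) : Int) - 1 = ((0 : Nat) : Int) := by norm_num
            simp [PySem.List.pyGet?_natCast, e0]
          · -- shift: dropping the leading non-hit changes every index by one
            have hsmall := ih (c0 :: cs) (by simp) hr
            rw [List.headD_cons, if_neg h2] at hsmall
            rw [show goB time (p0 :: ps) ((c0 :: cs) :: r)
                = goB time (c0 :: cs) r by simp [goB, h2]]
            rw [← hsmall]
            have hheads' : headsOf ((c0 :: cs) :: r)
                = some (c0 :: r.map (fun f => f.headD 0)) := by
              rw [headsOf_eq]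
              · simp
              · intro f hf
                simp only [List.mem_cons] at hf
                rcases hf with rfl | hf
                · simp
                · exact hr f hf
            simp only [findTwoKeyframesToInterpolate_alt, hheads, hheads', List.map_cons,
              decide_eq_false h1, decide_eq_false h2]
            set H := (r.map (fun f => f.headD 0)).map (fun t => decide (time ≤ t)) with hH
            by_cases hcon : true ∈ H
            · have hbig : ((false : Bool) :: false :: H).contains true = true := by
                simp [hcon]
              have hsm : ((false : Bool) :: H).contains true = true := by simp [hcon]
              rw [if_pos hbig, if_pos hsm]
              cases hk' : PySem.List.index? H true with
              | none =>
                rw [PySem.List.index?_eq_none_iff] at hk'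
                exact absurd hcon hk'
              | some k' =>
                rw [PySem.List.index?_cons_of_ne _ (show (false : Bool) ≠ true by decide),
                  PySem.List.index?_cons_of_ne _ (show (false : Bool) ≠ true by decide),
                  hk']
                simp only [Option.map_some, Option.map_map, Function.comp]
                have e1 : PySem.List.pyGet? ((p0 :: ps) :: (c0 :: cs) :: r) ((k' + 1 + 1 : Nat) : Int)
                    = PySem.List.pyGet? ((c0 :: cs) :: r) ((k' + 1 : Nat) : Int) := by
                  rw [PySem.List.pyGet?_natCast, PySem.List.pyGet?_natCast]
                  simp
                have e2 : PySem.List.pyGet? ((p0 :: ps) :: (c0 :: cs) :: r) (((k' + 1 + 1 : Nat) : Int) - 1)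
                    = PySem.List.pyGet? ((c0 :: cs) :: r) (((k' + 1 : Nat) : Int) - 1) := by
                  have a1 : ((k' + 1 + 1 : Nat) : Int) - 1 = ((k' + 1 : Nat) : Int) := by
                    push_cast; ring
                  have a2 : ((k' + 1 : Nat) : Int) - 1 = ((k' : Nat) : Int) := by
                    push_cast; ring
                  rw [a1, a2, PySem.List.pyGet?_natCast, PySem.List.pyGet?_natCast]
                  simp
                rw [e1, e2]
                simp only [show (0 < k' + 1 + 1) = True by simp,
                  show (0 < k' + 1) = True by simp, if_true]
            · rw [if_neg (by simp [hcon]), if_neg (by simp [hcon]),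
                PySem.List.pyGet?_neg_one, PySem.List.pyGet?_neg_one,
                List.getLast?_cons_cons]

-- ===== VERDICT (by name: the statement is the Claim_ definition above) =====
theorem findTwoKeyframesToInterpolate_spec : Claim_equal_findTwoKeyframesToInterpolate := by
  intro frames time _ hpre
  obtain ⟨hne, hall⟩ := hpre
  unfold Spec_findTwoKeyframesToInterpolate
  cases frames with
  | nil => exact absurd rfl hne
  | cons f0 rest =>
    have hf0 : f0 ≠ [] := hall f0 (by simp)
    have hrest : ∀ f ∈ rest, f ≠ [] := fun f hf => hall f (by simp [hf])
    cases f0 with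
    | nil => exact absurd rfl hf0
    | cons t0 ts =>
      have hA : findTwoKeyframesToInterpolate ((t0 :: ts) :: rest) time
          = postA time (loopL time none (t0 :: ts) rest (rest.length + 1)) := by
        have hlen : ((t0 :: ts) :: rest).length = rest.length + 1 := by simp
        have hloop : loopA ((t0 :: ts) :: rest) time none (t0 :: ts) 1 (rest.length + 1)
            = loopL time none (t0 :: ts) rest (rest.length + 1) := by
          rw [loopA_eq_loopL]; rfl
        simp only [findTwoKeyframesToInterpolate, postA, PySem.List.pyGet?_zero_cons,
          hlen, hloop]
      rw [hA, alt_eq_goB time rest (t0 :: ts) (by simp) hrest]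
      by_cases ht : time ≤ t0
      · have hexit : loopL time none (t0 :: ts) rest (rest.length + 1)
            = (none, t0 :: ts) := by
          simp only [loopL, PySem.List.pyGet?_zero_cons,
            if_neg (show ¬ time > t0 by omega)]
        rw [hexit]
        simp only [postA, List.headD, PySem.List.pyGet?_zero_cons,
          if_pos ht, if_neg (show ¬ time > t0 by omega)]
      · rw [if_neg (by simpa [List.headD] using ht)]
        exact main_lemma time rest (t0 :: ts) none rest.length (Nat.le_refl _) (by simp)
          hrest (by simp only [List.headD]; omega)
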